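-- pv_equiv track=rewrite | github.com/gosueep/Kattis | 1.4/Trik.py | borko
-- ===== SOURCE A (Python) =====
-- def borko(moves):
--
--     cups = [1, 0, 0]
--
--     for move in moves:
--         if move == 'A':
--             cups[0], cups[1] = cups[1], cups[0]     # swap 1st and 2nd cup
--         elif move == 'B':
--             cups[1], cups[2] = cups[2], cups[1]     # swap 2nd and 3rd cup
--         elif move == 'C':
--             cups[0], cups[2] = cups[2], cups[0]     # swap 1st and 3rd cup
--
--     return cups.index(1) + 1
-- ===== SOURCE B (Python) =====
-- # B composes permutations instead of simulating state: each move is a permutation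
-- # of the three positions; scan the moves back-to-front, maintaining the net
-- # permutation of the suffix seen so far, and finally read off where position 0
-- # (the ball's start) is sent.  No cup array, no running ball position.
-- PERM = {'A': (1, 0, 2), 'B': (0, 2, 1), 'C': (2, 1, 0)}
-- IDENT = (0, 1, 2)
--
-- def borko(moves):
--     q = IDENT                      # net permutation of the suffix processed so far
--     for move in reversed(moves):
--         p = PERM.get(move, IDENT)
--         q = (q[p[0]], q[p[1]], q[p[2]])   # q after p  (p acts first)
--     return q[0] + 1
-- ===== Notes on version B (the rewrite author's own statement) =====
-- stated objective: alternative
-- what changed: B treats each move as a permutation of the three positions and composes them right-to-left into one net suffix permutation (no cup array, no running ball position), then applies that permutation to the ball's start position 0.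
import Mathlib
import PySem

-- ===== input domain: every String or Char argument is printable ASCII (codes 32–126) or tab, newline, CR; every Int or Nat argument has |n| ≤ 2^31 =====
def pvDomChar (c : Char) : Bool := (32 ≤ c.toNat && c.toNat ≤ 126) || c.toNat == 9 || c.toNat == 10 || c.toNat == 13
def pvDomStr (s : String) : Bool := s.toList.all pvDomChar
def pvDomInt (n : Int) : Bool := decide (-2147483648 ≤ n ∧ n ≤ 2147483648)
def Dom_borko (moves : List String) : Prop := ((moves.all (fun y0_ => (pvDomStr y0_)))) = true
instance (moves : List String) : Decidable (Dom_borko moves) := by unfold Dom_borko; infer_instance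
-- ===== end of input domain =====

-- B replaces A's per-move cup-array simulation by composing the moves, read
-- back-to-front, into one net permutation of the three positions, then applying
-- it to the ball's start position: an alternative algorithm, not faster.

-- ===== PORT A =====
-- the cups list [c0, c1, c2] as a triple; each branch swaps two cells
def borkoStep (c : Int × Int × Int) (move : String) : Int × Int × Int :=
  if move == "A" then (c.2.1, c.1, c.2.2)
  else if move == "B" then (c.1, c.2.2, c.2.1)
  else if move == "C" then (c.2.2, c.2.1, c.1)
  else c

def borko (moves : List String) : Int :=
  let c := moves.foldl borkoStep (1, 0, 0)
  -- cups.index(1) + 1 (1 is always present, so Python's .index cannot raise)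
  ((PySem.List.index? [c.1, c.2.1, c.2.2] (1 : Int)).getD 0 : Nat) + 1

-- ===== PORT B =====
-- PERM lookup with identity default: PERM.get(move, IDENT)
def permOf (move : String) : Int × Int × Int :=
  (PySem.Dict.ofList [("A", ((1 : Int), (0 : Int), (2 : Int))),
                      ("B", (0, 2, 1)), ("C", (2, 1, 0))]).getD move (0, 1, 2)

-- q[i] for the permutation triple q
def pidx (q : Int × Int × Int) (i : Int) : Int :=
  if i == 0 then q.1 else if i == 1 then q.2.1 else q.2.2

-- q = (q[p[0]], q[p[1]], q[p[2]])
def pcomp (q p : Int × Int × Int) : Int × Int × Int :=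
  (pidx q p.1, pidx q p.2.1, pidx q p.2.2)

def borko_alt (moves : List String) : Int :=
  -- for move in reversed(moves): q = compose
  pidx (moves.reverse.foldl (fun q m => pcomp q (permOf m)) (0, 1, 2)) 0 + 1

-- ===== PRECONDITION & SPEC =====
def Spec_borko (moves : List String) (out : Int) : Prop := out = borko_alt moves
instance (moves : List String) (out : Int) : Decidable (Spec_borko moves out) := by unfold Spec_borko; infer_instance

-- ===== CLAIM (what is proved, stated in full; the proofs are below) =====
def Claim_equal_borko : Prop := ∀ (moves : List String), Dom_borko moves → Spec_borko moves (borko moves)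

-- ===== LEMMAS AND PROOFS =====

-- ball position after applying the moves left-to-right, the common reference
def posFold (moves : List String) (p : Int) : Int :=
  moves.foldl (fun x m => pidx (permOf m) x) p

-- one-hot encoding of the ball position as a cup configuration
def oneHot (p : Int) : Int × Int × Int :=
  if p = 0 then (1, 0, 0) else if p = 1 then (0, 1, 0) else (0, 0, 1)

lemma permOf_cases (m : String) :
    permOf m = (1, 0, 2) ∨ permOf m = (0, 2, 1) ∨ permOf m = (2, 1, 0) ∨
    permOf m = (0, 1, 2) := by
  unfold permOf
  by_cases hA : m = "A"
  · subst hA; left; rfl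
  by_cases hB : m = "B"
  · subst hB; right; left; rfl
  by_cases hC : m = "C"
  · subst hC; right; right; left; rfl
  have hA' : ("A" == m) = false := by simp [Ne.symm hA]
  have hB' : ("B" == m) = false := by simp [Ne.symm hB]
  have hC' : ("C" == m) = false := by simp [Ne.symm hC]
  right; right; right
  have hSW : PySem.Dict.ofList [("A", ((1 : Int), (0 : Int), (2 : Int))),
      ("B", (0, 2, 1)), ("C", (2, 1, 0))] =
      PySem.Dict.mk [("A", ((1 : Int), (0 : Int), (2 : Int))),
        ("B", (0, 2, 1)), ("C", (2, 1, 0))] := by rfl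
  simp [hSW, PySem.Dict.getD, PySem.Dict.get?_mk_cons, PySem.Dict.get?, hA', hB', hC']

lemma pidx_mem (m : String) (p : Int) (hp : p = 0 ∨ p = 1 ∨ p = 2) :
    pidx (permOf m) p = 0 ∨ pidx (permOf m) p = 1 ∨ pidx (permOf m) p = 2 := by
  rcases permOf_cases m with h | h | h | h <;> rw [h] <;>
    rcases hp with hp | hp | hp <;> subst hp <;> simp [pidx]

lemma step_sim (p : Int) (hp : p = 0 ∨ p = 1 ∨ p = 2) (m : String) :
    borkoStep (oneHot p) m = oneHot (pidx (permOf m) p) := by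
  unfold borkoStep permOf
  by_cases hA : m = "A"
  · subst hA; rcases hp with hp | hp | hp <;> subst hp <;> decide
  by_cases hB : m = "B"
  · subst hB; rcases hp with hp | hp | hp <;> subst hp <;> decide
  by_cases hC : m = "C"
  · subst hC; rcases hp with hp | hp | hp <;> subst hp <;> decide
  have hA' : ("A" == m) = false := by simp [Ne.symm hA]
  have hB' : ("B" == m) = false := by simp [Ne.symm hB]
  have hC' : ("C" == m) = false := by simp [Ne.symm hC]
  have hm : (m == "A") = false := by simp [hA]
  have hm2 : (m == "B") = false := by simp [hB]
  have hm3 : (m == "C") = false := by simp [hC]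
  have hSW : PySem.Dict.ofList [("A", ((1 : Int), (0 : Int), (2 : Int))),
      ("B", (0, 2, 1)), ("C", (2, 1, 0))] =
      PySem.Dict.mk [("A", ((1 : Int), (0 : Int), (2 : Int))),
        ("B", (0, 2, 1)), ("C", (2, 1, 0))] := by rfl
  rcases hp with hp | hp | hp <;> subst hp <;>
    simp [hm, hm2, hm3, hA', hB', hC', hSW, PySem.Dict.getD, PySem.Dict.get?,
      PySem.Dict.get?_mk_cons, oneHot, pidx]

-- A's fold tracked through one-hot configurations equals the reference position fold
lemma fold_sim (moves : List String) (p : Int) (hp : p = 0 ∨ p = 1 ∨ p = 2) :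
    moves.foldl borkoStep (oneHot p) = oneHot (posFold moves p) ∧
    (posFold moves p = 0 ∨ posFold moves p = 1 ∨ posFold moves p = 2) := by
  induction moves generalizing p with
  | nil => exact ⟨rfl, hp⟩
  | cons m ms ih =>
    have h1 := step_sim p hp m
    have h2 := pidx_mem m p hp
    simpa [posFold, List.foldl, h1] using ih (pidx (permOf m) p) h2

lemma pidx_pcomp (q p : Int × Int × Int) (x : Int) (hx : x = 0 ∨ x = 1 ∨ x = 2) :
    pidx (pcomp q p) x = pidx q (pidx p x) := by
  rcases hx with hx | hx | hx <;> subst hx <;> rfl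

-- B's back-to-front composed suffix permutation applied to x = the reference fold
lemma comp_sim (moves : List String) (x : Int) (hx : x = 0 ∨ x = 1 ∨ x = 2) :
    pidx (moves.reverse.foldl (fun q m => pcomp q (permOf m)) (0, 1, 2)) x =
      posFold moves x := by
  induction moves generalizing x with
  | nil =>
    rcases hx with hx | hx | hx <;> subst hx <;> rfl
  | cons m ms ih =>
    have happ : (m :: ms).reverse.foldl (fun q m => pcomp q (permOf m)) (0, 1, 2) =
        pcomp (ms.reverse.foldl (fun q m => pcomp q (permOf m)) (0, 1, 2)) (permOf m) := by
      simp [List.foldl_append]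
    rw [happ, pidx_pcomp _ _ _ hx]
    simpa [posFold, List.foldl] using ih (pidx (permOf m) x) (pidx_mem m x hx)

-- ===== VERDICT =====
theorem borko_spec : Claim_equal_borko := by
  intro moves _
  unfold Spec_borko borko borko_alt
  obtain ⟨h1, h2⟩ := fold_sim moves 0 (by left; rfl)
  have h0 : oneHot 0 = ((1 : Int), (0 : Int), (0 : Int)) := rfl
  rw [← h0, h1, comp_sim moves 0 (by left; rfl)]
  rcases h2 with h | h | h <;> rw [h] <;> rfl
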